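-- pv_equiv track=rewrite | github.com/alimajed/python-programming | problem_solving/stack_and_queue/voracious_fish/solution.py | solution
-- ===== SOURCE A (Python) =====
-- def solution(directions, weights):
--     stack = []
--     survivors = 0
--     for i in range(len(directions)):
--         weight = weights[i]
--         # NOTE swimming to the right
--         if directions[i] == 1:
--             stack.append(weight)
--         else:
--             weight_down = stack.pop() if stack else -1
--             # NOTE keep comparing the fishes in the stack with the current item
--             # # if the fish in the stack is smaller, we throw it and we pop again
--             while weight_down != -1 and weight_down < weight:
--                 weight_down = stack.pop() if stack else -1
--             # NOTE the stack is empty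
--             if weight_down == -1:
--                 survivors += 1
--             # NOTE return the fish to the stack
--             else:
--                 stack.append(weight_down)
--
--     return survivors + len(stack)
-- ===== SOURCE B (Python) =====
-- def solution(directions, weights):
--     # Stackless two-pass algorithm: a left-mover survives iff it outweighs the
--     # heaviest right-mover still alive before it (tracked as one scalar, since a
--     # winning left-mover clears ALL alive right-movers); a right-mover survives
--     # iff it meets the heaviest unblocked left-moving threat to its right
--     # (tracked as one scalar in a backward pass: a right-mover >= the threat
--     # blocks every threat, a lighter one blocks none that matter).
--     pairs = list(zip(directions, weights))
--     survivors = 0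
--     m = None  # heaviest right-moving fish still alive
--     for d, w in pairs:
--         if d == 1:
--             if m is None or w > m:
--                 m = w
--         else:
--             if m is None or w > m:
--                 survivors += 1
--                 m = None
--     e = None  # heaviest left-moving threat not yet blocked
--     for d, w in reversed(pairs):
--         if d == 1:
--             if e is None or w >= e:
--                 survivors += 1
--                 e = None
--         else:
--             if e is None or w > e:
--                 e = w
--     return survivors
-- ===== Notes on version B (the rewrite author's own statement) =====
-- stated objective: alternative
-- what changed: B abandons the stack simulation entirely: two opposite-direction passes with O(1) scalar state — a forward pass counts surviving left-movers by tracking only the heaviest right-mover still alive, and a backward pass counts surviving right-movers by tracking only the heaviest left-moving threat not yet blocked.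
-- outside the precondition, e.g. on solution([1, 0, 0], [-1, -2, -3]): A returns 2, B returns 1; on solution([1], []): A raises IndexError, B returns 0
import Mathlib
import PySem

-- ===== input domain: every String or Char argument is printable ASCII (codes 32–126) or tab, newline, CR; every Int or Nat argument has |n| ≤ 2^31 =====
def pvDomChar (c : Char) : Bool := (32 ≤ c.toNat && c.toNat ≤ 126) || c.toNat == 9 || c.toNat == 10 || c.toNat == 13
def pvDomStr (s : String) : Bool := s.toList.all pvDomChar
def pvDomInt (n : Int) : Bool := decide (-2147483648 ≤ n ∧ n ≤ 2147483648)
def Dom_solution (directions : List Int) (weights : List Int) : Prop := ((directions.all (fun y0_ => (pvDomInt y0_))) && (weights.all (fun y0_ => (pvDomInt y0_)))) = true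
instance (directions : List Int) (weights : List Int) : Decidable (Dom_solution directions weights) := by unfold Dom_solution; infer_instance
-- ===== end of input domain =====

-- B replaces A's stack simulation by two opposite-direction scalar passes (max alive
-- right-mover forward, max unblocked left threat backward); objective: alternative algorithm.


-- ===== PORT A =====
-- A's inner while loop: weight_down = stack.pop() if stack else -1, repeated while
-- weight_down != -1 and weight_down < weight; returns (final weight_down, remaining stack).
-- Stack top = list head.
def aFight (stack : List Int) (weight : Int) : Int × List Int :=
  match stack with
  | [] => (-1, [])
  | x :: xs => if x = -1 ∨ ¬ x < weight then (x, xs) else aFight xs weight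

def solution (directions : List Int) (weights : List Int) : Int :=
  let fin := (PySem.List.pyRange 0 (directions.length : Int) 1).foldl
    (fun (st : List Int × Int) (i : Int) =>
      let weight := PySem.List.pyGetD weights i 0
      if PySem.List.pyGetD directions i 0 = 1 then
        (weight :: st.1, st.2)
      else
        let r := aFight st.1 weight
        if r.1 = -1 then (r.2, st.2 + 1) else (r.1 :: r.2, st.2))
    ([], 0)
  fin.2 + (fin.1.length : Int)

-- ===== PORT B =====
-- Forward pass: m = heaviest right-moving fish still alive (none = no alive right-mover).
def p1step (st : Option Int × Int) (dw : Int × Int) : Option Int × Int :=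
  if dw.1 = 1 then
    ((match st.1 with
      | none => some dw.2
      | some v => if dw.2 > v then some dw.2 else some v), st.2)
  else
    match st.1 with
    | none => (none, st.2 + 1)
    | some v => if dw.2 > v then (none, st.2 + 1) else (some v, st.2)

-- Backward pass: e = heaviest left-moving threat not yet blocked.
def p2step (st : Option Int × Int) (dw : Int × Int) : Option Int × Int :=
  if dw.1 = 1 then
    match st.1 with
    | none => (none, st.2 + 1)
    | some v => if dw.2 ≥ v then (none, st.2 + 1) else (some v, st.2)
  else
    ((match st.1 with
      | none => some dw.2
      | some v => if dw.2 > v then some dw.2 else some v), st.2)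

def solution_alt (directions : List Int) (weights : List Int) : Int :=
  let pairs := directions.zip weights
  let s1 := pairs.foldl p1step (none, 0)
  let s2 := pairs.reverse.foldl p2step (none, s1.2)
  s2.2

-- ===== PRECONDITION & SPEC =====
-- Pre_ excludes (a) inputs with fewer weights than directions, on which A raises IndexError,
-- and (b) inputs with a right-swimming fish of weight -1, A's empty-stack sentinel value, which
-- makes that fish be conflated with an empty stack once popped — a corner outside the problem's
-- natural domain (positive fish weights) that no one would specify.
def Pre_solution (directions : List Int) (weights : List Int) : Prop :=
  directions.length ≤ weights.length ∧
    ∀ p ∈ directions.zip weights, p.1 = 1 → p.2 ≠ -1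
instance (directions : List Int) (weights : List Int) : Decidable (Pre_solution directions weights) := by unfold Pre_solution; infer_instance

def pvWitness_solution : List Int × List Int := ([1, 0], [5, 3])

def Spec_solution (directions : List Int) (weights : List Int) (out : Int) : Prop := out = solution_alt directions weights
instance (directions : List Int) (weights : List Int) (out : Int) : Decidable (Spec_solution directions weights out) := by unfold Spec_solution; infer_instance

-- ===== CLAIM (what is proved, stated in full; the proofs are below) =====
def Claim_equal_solution : Prop := ∀ (directions : List Int) (weights : List Int), Dom_solution directions weights → Pre_solution directions weights → Spec_solution directions weights (solution directions weights)

-- ===== LEMMAS AND PROOFS =====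

-- A's loop body over a (direction, weight) pair.
def aStep (st : List Int × Int) (dw : Int × Int) : List Int × Int :=
  if dw.1 = 1 then (dw.2 :: st.1, st.2)
  else
    let r := aFight st.1 dw.2
    if r.1 = -1 then (r.2, st.2 + 1) else (r.1 :: r.2, st.2)

theorem foldl_pyRange_getD2 {σ : Type} (f : σ → Int → Int → σ) :
    ∀ (ds ws : List Int) (init : σ), ds.length ≤ ws.length →
    (PySem.List.pyRange 0 (ds.length : Int) 1).foldl
      (fun st i => f st (PySem.List.pyGetD ds i 0) (PySem.List.pyGetD ws i 0)) init
    = (ds.zip ws).foldl (fun st p => f st p.1 p.2) init := by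
  intro ds
  induction ds with
  | nil => intro ws init _; simp [PySem.List.pyRange_one_eq_nil]
  | cons a as ih =>
    intro ws init h
    cases ws with
    | nil => simp at h
    | cons b bs =>
      have hb : ((0:Int)) < ((a :: as).length : Int) := by simp
      rw [PySem.List.pyRange_one_cons hb]
      simp only [List.foldl_cons, List.zip_cons_cons]
      have h0a : PySem.List.pyGetD (a :: as) 0 0 = a := by
        simp [PySem.List.pyGetD, PySem.List.pyGet?, PySem.List.pyIdx?]
      have h0b : PySem.List.pyGetD (b :: bs) 0 0 = b := by
        simp [PySem.List.pyGetD, PySem.List.pyGet?, PySem.List.pyIdx?]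
      rw [h0a, h0b]
      have hrange : PySem.List.pyRange (0+1) (((a :: as).length : Nat) : Int) 1
          = (List.range as.length).map (fun k : Nat => (1:Int) + (k:Int)) := by
        rw [PySem.List.pyRange_one]
        have : ((((a :: as).length : Nat) : Int) - (0+1)).toNat = as.length := by
          simp [List.length_cons]
        rw [this]
        simp
      rw [hrange, List.foldl_map]
      have ihs := ih bs (f init a b) (by simpa using h)
      rw [PySem.List.pyRange_one] at ihs
      simp only [sub_zero, Int.toNat_natCast, List.foldl_map, zero_add] at ihs
      rw [← ihs]
      apply PySem.List.foldl_congr_mem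
      intro acc x hx
      have : (1:Int) + (x:Int) = ((x+1 : Nat) : Int) := by push_cast; ring
      rw [this, PySem.List.pyGetD_natCast, PySem.List.pyGetD_natCast,
          PySem.List.pyGetD_natCast, PySem.List.pyGetD_natCast]
      simp

theorem index_to_zip (ds : List Int) (ws : List Int) (init : List Int × Int)
    (h : ds.length ≤ ws.length) :
    (PySem.List.pyRange 0 (ds.length : Int) 1).foldl
      (fun st i =>
        let weight := PySem.List.pyGetD ws i 0
        if PySem.List.pyGetD ds i 0 = 1 then (weight :: st.1, st.2)
        else
          let r := aFight st.1 weight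
          if r.1 = -1 then (r.2, st.2 + 1) else (r.1 :: r.2, st.2))
      init
    = (ds.zip ws).foldl aStep init :=
  foldl_pyRange_getD2
    (fun st dv wv =>
      if dv = 1 then (wv :: st.1, st.2)
      else
        let r := aFight st.1 wv
        if r.1 = -1 then (r.2, st.2 + 1) else (r.1 :: r.2, st.2))
    ds ws init h

-- aFight on a stack without the sentinel value is dropWhile (< w).
theorem aFight_eq_dropWhile : ∀ (sa : List Int) (w : Int), (-1 : Int) ∉ sa →
    aFight sa w = (match sa.dropWhile (fun x => decide (x < w)) with
      | [] => ((-1 : Int), ([] : List Int))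
      | x :: xs => (x, xs)) := by
  intro sa
  induction sa with
  | nil => intro w _; simp [aFight]
  | cons a as ih =>
    intro w h
    have ha : a ≠ -1 := fun hc => h (hc ▸ List.mem_cons_self ..)
    by_cases hlt : a < w
    · simp only [aFight, List.dropWhile_cons, hlt, decide_true, if_true]
      rw [if_neg (by simp [ha, hlt])]
      exact ih w (fun hm => h (List.mem_cons_of_mem _ hm))
    · simp [aFight, List.dropWhile_cons, hlt]

def listMax : List Int → Option Int
  | [] => none
  | x :: xs => match listMax xs with
    | none => some x
    | some v => some (max x v)

theorem listMax_eq_none_iff (sa : List Int) : listMax sa = none ↔ sa = [] := by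
  cases sa with
  | nil => simp [listMax]
  | cons a as =>
    simp only [listMax]
    cases listMax as <;> simp

theorem le_listMax : ∀ (sa : List Int) (x v : Int), x ∈ sa → listMax sa = some v → x ≤ v := by
  intro sa
  induction sa with
  | nil => intro x v hx; simp at hx
  | cons a as ih =>
    intro x v hx hv
    simp only [listMax] at hv
    rcases List.mem_cons.mp hx with h | h
    · cases hm : listMax as with
      | none => rw [hm] at hv; cases hv; omega
      | some u => rw [hm] at hv; cases hv; subst h; exact le_max_left _ _
    · cases hm : listMax as with
      | none =>
        rw [listMax_eq_none_iff] at hm; subst hm; simp at h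
      | some u =>
        rw [hm] at hv; cases hv
        exact le_trans (ih x u h hm) (le_max_right _ _)

theorem listMax_forall_lt (sa : List Int) (w : Int) :
    (∀ x ∈ sa, x < w) ↔ (match listMax sa with | none => True | some v => v < w) := by
  cases hm : listMax sa with
  | none =>
    rw [listMax_eq_none_iff] at hm; subst hm; simp
  | some v =>
    simp only []
    constructor
    · intro h
      have : sa ≠ [] := by
        intro hc; subst hc; simp [listMax] at hm
      -- v ∈ sa: prove by induction-free argument
      have hv : v ∈ sa := by
        clear h this
        induction sa generalizing v with
        | nil => simp [listMax] at hm
        | cons a as ih =>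
          simp only [listMax] at hm
          cases hma : listMax as with
          | none => rw [hma] at hm; cases hm; exact List.mem_cons_self ..
          | some u =>
            rw [hma] at hm; cases hm
            rcases max_choice a u with h | h
            · rw [h]; exact List.mem_cons_self ..
            · rw [h]; exact List.mem_cons_of_mem _ (ih u hma)
      exact h v hv
    · intro h x hx
      exact lt_of_le_of_lt (le_listMax sa x v hx hm) h

theorem dropWhile_eq_nil_iff_lt (sa : List Int) (w : Int) :
    sa.dropWhile (fun x => decide (x < w)) = [] ↔ ∀ x ∈ sa, x < w := by
  rw [List.dropWhile_eq_nil_iff]; simp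

theorem listMax_dropWhile : ∀ (sa : List Int) (w : Int),
    sa.dropWhile (fun x => decide (x < w)) ≠ [] →
    listMax (sa.dropWhile (fun x => decide (x < w))) = listMax sa := by
  intro sa
  induction sa with
  | nil => intro w h; simp at h
  | cons a as ih =>
    intro w h
    by_cases hlt : a < w
    · simp only [List.dropWhile_cons, hlt, decide_true, if_true] at h ⊢
      rw [ih w h]
      simp only [listMax]
      cases hm : listMax as with
      | none =>
        rw [listMax_eq_none_iff] at hm; subst hm; simp at h
      | some v =>
        -- a < w ≤ head of dropWhile ≤ v
        have hne := h
        cases hd : as.dropWhile (fun x => decide (x < w)) with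
        | nil => exact absurd hd hne
        | cons y ys =>
          have hyw : w ≤ y := by
            have := List.head?_dropWhile_not (fun x => decide (x < w)) as
            rw [hd] at this; simp at this; omega
          have hy : y ∈ as := by
            have : y ∈ as.dropWhile (fun x => decide (x < w)) := by
              rw [hd]; exact List.mem_cons_self ..
            exact (List.dropWhile_sublist _).mem this
          have : a ≤ v := le_trans (le_of_lt (lt_of_lt_of_le hlt hyw))
            (le_listMax as y v hy hm)
          simp [max_eq_right this]
    · simp [List.dropWhile_cons, hlt]

-- popE sa e : the elements of sa surviving the pending threat e.
def popE (sa : List Int) (e : Option Int) : List Int :=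
  match e with
  | none => sa
  | some v => sa.dropWhile (fun x => decide (x < v))

theorem dropWhile_dropWhile_le (v w : Int) (h : v ≤ w) : ∀ (sa : List Int),
    (sa.dropWhile (fun x => decide (x < w))).dropWhile (fun x => decide (x < v))
      = sa.dropWhile (fun x => decide (x < w)) := by
  intro sa
  induction sa with
  | nil => simp
  | cons a as ih =>
    by_cases hlt : a < w
    · simp only [List.dropWhile_cons, hlt, decide_true, if_true]; exact ih
    · have hv : ¬ a < v := by omega
      simp [List.dropWhile_cons, hlt, hv]

theorem dropWhile_dropWhile_ge (v w : Int) (h : w ≤ v) : ∀ (sa : List Int),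
    (sa.dropWhile (fun x => decide (x < w))).dropWhile (fun x => decide (x < v))
      = sa.dropWhile (fun x => decide (x < v)) := by
  intro sa
  induction sa with
  | nil => simp
  | cons a as ih =>
    by_cases hlt : a < w
    · have hv : a < v := by omega
      simp [List.dropWhile_cons, hlt, hv, ih]
    · simp [List.dropWhile_cons, hlt]

-- Forward pass invariant: the scalar m is listMax of A's stack, counters agree.
theorem pass1_invariant : ∀ (l : List (Int × Int)) (sa : List Int) (c : Int),
    (-1 : Int) ∉ sa → (∀ p ∈ l, p.1 = 1 → p.2 ≠ -1) →
    (l.foldl aStep (sa, c)).2 = (l.foldl p1step (listMax sa, c)).2 := by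
  intro l
  induction l with
  | nil => intro sa c _ _; rfl
  | cons p t ih =>
    intro sa c hsa hl
    obtain ⟨d, w⟩ := p
    have hl' : ∀ q ∈ t, q.1 = 1 → q.2 ≠ -1 := fun q hq => hl q (List.mem_cons_of_mem _ hq)
    simp only [List.foldl_cons]
    by_cases hd : d = 1
    · have hw : w ≠ -1 := hl (d, w) (List.mem_cons_self ..) hd
      have ha : aStep (sa, c) (d, w) = (w :: sa, c) := by simp [aStep, hd]
      have hb : p1step (listMax sa, c) (d, w) = (listMax (w :: sa), c) := by
        simp only [p1step, hd, if_true]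
        simp only [listMax]
        cases listMax sa with
        | none => rfl
        | some v =>
          by_cases hwv : w > v
          · simp only [hwv, if_true]; rw [max_eq_left (le_of_lt hwv)]
          · simp only [hwv, if_false]; rw [max_eq_right (by omega)]
      rw [ha, hb]
      exact ih (w :: sa) c (by simp [hsa, Ne.symm hw]) hl'
    · rw [show aStep (sa, c) (d, w)
          = (match sa.dropWhile (fun x => decide (x < w)) with
             | [] => (([] : List Int), c + 1)
             | x :: xs => (x :: xs, c)) by
        simp only [aStep, if_neg hd, aFight_eq_dropWhile sa w hsa]
        cases hD : sa.dropWhile (fun x => decide (x < w)) with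
        | nil => simp
        | cons x xs =>
          have hx : x ∈ sa := (List.dropWhile_sublist _).mem (hD ▸ List.mem_cons_self ..)
          have : x ≠ -1 := fun hc => hsa (hc ▸ hx)
          simp [this]]
      cases hD : sa.dropWhile (fun x => decide (x < w)) with
      | nil =>
        have hall : ∀ x ∈ sa, x < w := (dropWhile_eq_nil_iff_lt sa w).mp hD
        have hb : p1step (listMax sa, c) (d, w) = (none, c + 1) := by
          simp only [p1step, if_neg hd]
          cases hm : listMax sa with
          | none => rfl
          | some v =>
            have : v < w := by
              have := (listMax_forall_lt sa w).mp hall; rw [hm] at this; exact this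
            simp [this]
        rw [hb]
        have := ih [] (c + 1) (by simp) hl'
        simpa [listMax] using this
      | cons x xs =>
        have hne : sa.dropWhile (fun x => decide (x < w)) ≠ [] := by rw [hD]; simp
        have hmeq : listMax (x :: xs) = listMax sa := hD ▸ listMax_dropWhile sa w hne
        have hb : p1step (listMax sa, c) (d, w) = (listMax sa, c) := by
          simp only [p1step, if_neg hd]
          cases hm : listMax sa with
          | none =>
            rw [listMax_eq_none_iff] at hm; subst hm; simp at hD
          | some v =>
            have hnv : ¬ v < w := by
              intro hv
              have : ∀ x ∈ sa, x < w := by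
                intro x hx
                exact lt_of_le_of_lt (le_listMax sa x v hx hm) hv
              rw [← dropWhile_eq_nil_iff_lt] at this
              rw [this] at hD; cases hD
            simp [hnv, not_lt.mp hnv]
        rw [hb, ← hmeq]
        have hsub : (-1 : Int) ∉ x :: xs := by
          intro hm
          exact hsa ((List.dropWhile_sublist (l := sa) (fun x => decide (x < w))).mem (hD ▸ hm))
        exact ih (x :: xs) c hsub hl'

-- Backward pass, as a foldr from the right end of the list.
def rstate (l : List (Int × Int)) : Option Int × Int :=
  List.foldr (fun p st => p2step st p) (none, 0) l

-- Counter offset of the backward pass is additive.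
theorem p2_shift : ∀ (l : List (Int × Int)) (c : Int),
    List.foldr (fun p st => p2step st p) (none, c) l
      = ((rstate l).1, c + (rstate l).2) := by
  intro l
  induction l with
  | nil => intro c; simp [rstate]
  | cons p t ih =>
    intro c
    simp only [List.foldr_cons, rstate] at *
    rw [ih c]
    have : List.foldr (fun p st => p2step st p) (none, 0) t
        = ((rstate t).1, (rstate t).2) := rfl
    rw [this]
    obtain ⟨d, w⟩ := p
    by_cases hd : d = 1
    · simp only [p2step, hd, if_true]
      cases (rstate t).1 with
      | none => simp; ring
      | some v =>
        by_cases hw : w ≥ v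
        · simp [hw]; ring
        · simp [hw]
    · simp only [p2step, if_neg hd]

-- Backward pass invariant: A's final stack length = backward count + survivors of the
-- initial stack under the pending threat.
theorem pass2_invariant : ∀ (l : List (Int × Int)) (sa : List Int) (c : Int),
    (-1 : Int) ∉ sa → (∀ p ∈ l, p.1 = 1 → p.2 ≠ -1) →
    ((l.foldl aStep (sa, c)).1.length : Int)
      = (rstate l).2 + ((popE sa (rstate l).1).length : Int) := by
  intro l
  induction l with
  | nil => intro sa c _ _; simp [rstate, popE]
  | cons p t ih =>
    intro sa c hsa hl
    obtain ⟨d, w⟩ := p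
    have hl' : ∀ q ∈ t, q.1 = 1 → q.2 ≠ -1 := fun q hq => hl q (List.mem_cons_of_mem _ hq)
    have hr : rstate ((d, w) :: t) = p2step (rstate t) (d, w) := rfl
    simp only [List.foldl_cons]
    by_cases hd : d = 1
    · have hw : w ≠ -1 := hl (d, w) (List.mem_cons_self ..) hd
      have ha : aStep (sa, c) (d, w) = (w :: sa, c) := by simp [aStep, hd]
      rw [ha]
      have iht := ih (w :: sa) c (by simp [hsa, Ne.symm hw]) hl'
      rw [iht, hr]
      simp only [p2step, hd, if_true]
      cases he : (rstate t).1 with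
      | none => simp [popE]; ring
      | some v =>
        by_cases hwv : w ≥ v
        · simp only [hwv, if_true]
          have : popE (w :: sa) (some v) = w :: sa := by
            simp [popE, List.dropWhile_cons, not_lt.mpr hwv]
          rw [this]
          simp [popE]; ring
        · simp only [hwv, if_false]
          have : popE (w :: sa) (some v) = popE sa (some v) := by
            simp only [popE, List.dropWhile_cons]
            rw [if_pos (by simp; omega)]
          rw [this]
    · rw [show aStep (sa, c) (d, w)
          = (match sa.dropWhile (fun x => decide (x < w)) with
             | [] => (([] : List Int), c + 1)
             | x :: xs => (x :: xs, c)) by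
        simp only [aStep, if_neg hd, aFight_eq_dropWhile sa w hsa]
        cases hD : sa.dropWhile (fun x => decide (x < w)) with
        | nil => simp
        | cons x xs =>
          have hx : x ∈ sa := (List.dropWhile_sublist _).mem (hD ▸ List.mem_cons_self ..)
          have : x ≠ -1 := fun hc => hsa (hc ▸ hx)
          simp [this]]
      have hDsub : (-1 : Int) ∉ sa.dropWhile (fun x => decide (x < w)) := by
        intro hm; exact hsa ((List.dropWhile_sublist _).mem hm)
      have key : ∀ c' : Int,
          ((t.foldl aStep (sa.dropWhile (fun x => decide (x < w)), c')).1.length : Int)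
            = (rstate ((d, w) :: t)).2
              + ((popE sa (rstate ((d, w) :: t)).1).length : Int) := by
        intro c'
        rw [ih (sa.dropWhile (fun x => decide (x < w))) c' hDsub hl', hr]
        simp only [p2step, if_neg hd]
        cases he : (rstate t).1 with
        | none => simp [popE]
        | some v =>
          by_cases hwv : w > v
          · simp only [hwv, if_true]
            have : popE (sa.dropWhile (fun x => decide (x < w))) (some v)
                = sa.dropWhile (fun x => decide (x < w)) :=
              dropWhile_dropWhile_le v w (le_of_lt hwv) sa
            rw [this]; simp [popE]
          · simp only [hwv, if_false]
            have : popE (sa.dropWhile (fun x => decide (x < w))) (some v)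
                = sa.dropWhile (fun x => decide (x < v)) :=
              dropWhile_dropWhile_ge v w (by omega) sa
            rw [this]; simp [popE]
      cases hD : sa.dropWhile (fun x => decide (x < w)) with
      | nil =>
        have := key (c + 1); rw [hD] at this; simpa using this
      | cons x xs =>
        have := key c; rw [hD] at this; simpa using this

-- ===== VERDICT (by name: the statement is the Claim_ definition above) =====
theorem solution_spec : Claim_equal_solution := by
  intro ds ws _ hpre
  obtain ⟨hlen, hm⟩ := hpre
  show solution ds ws = solution_alt ds ws
  unfold solution solution_alt
  rw [index_to_zip ds ws ([], 0) hlen]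
  simp only [List.foldl_reverse]
  rw [show (fun (x : Int × Int) (y : Option Int × Int) => p2step y x)
      = (fun p st => p2step st p) from rfl]
  rw [p2_shift]
  have h1 := pass1_invariant (ds.zip ws) [] 0 (by simp) hm
  have h2 := pass2_invariant (ds.zip ws) [] 0 (by simp) hm
  simp only [listMax] at h1
  rw [h1] at *
  rw [h2]
  simp [popE]
  cases (rstate (ds.zip ws)).1 <;> simp
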